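-- pv_equiv track=rewrite | github.com/prongs1996/DNA-TRNG | peres_debiasing/peres.py | amls_round
-- ===== SOURCE A (Python) =====
-- def amls_round(stream):
--     if len(stream) < 2:
--         return []
--     res = []
--     s1 = []
--     sa = []
--     p0 = None
--     for p1 in stream:
--         if p0 == None:
--             p0 = p1
--         else:
--             if p0 == p1:
--                 sa.append('0')
--                 s1.append(str(p0))
--             else:
--                 sa.append('1')
--                 res.append(str(p0))
--             p0 = None
--     return res + amls_round(sa) + amls_round(s1)
-- ===== SOURCE B (Python) =====
-- def amls_round(stream):
--     # Iterative explicit-stack pre-order traversal; pairs taken by index instead of a carry variable.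
--     out = []
--     stack = [stream]
--     while stack:
--         s = stack.pop()
--         n = len(s)
--         if n < 2:
--             continue
--         res, s1, sa = [], [], []
--         for i in range(0, n - 1, 2):
--             a, b = s[i], s[i + 1]
--             if a == b:
--                 sa.append('0')
--                 s1.append(str(a))
--             else:
--                 sa.append('1')
--                 res.append(str(a))
--         out.extend(res)
--         stack.append(s1)
--         stack.append(sa)
--     return out
-- ===== Notes on version B (the rewrite author's own statement) =====
-- stated objective: alternative
-- what changed: Replaced the recursion res + f(sa) + f(s1) by an explicit-stack iterative pre-order traversal with a single output accumulator, and the carry-variable pairing loop by an index loop taking elements two at a time.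
import Mathlib
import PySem

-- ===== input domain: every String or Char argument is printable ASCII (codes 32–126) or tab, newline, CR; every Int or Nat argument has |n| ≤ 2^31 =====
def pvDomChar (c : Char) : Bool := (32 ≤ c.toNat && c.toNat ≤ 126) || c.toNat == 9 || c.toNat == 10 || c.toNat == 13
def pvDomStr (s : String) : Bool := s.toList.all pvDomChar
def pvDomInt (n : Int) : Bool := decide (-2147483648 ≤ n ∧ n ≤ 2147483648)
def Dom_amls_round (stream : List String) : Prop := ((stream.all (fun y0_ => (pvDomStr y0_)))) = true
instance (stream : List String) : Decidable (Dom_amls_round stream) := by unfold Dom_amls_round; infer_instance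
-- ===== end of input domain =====

-- B replaces A's recursion by an explicit-stack pre-order traversal with an index-pair loop (alternative decomposition, same cost).

-- ===== PORT A =====
-- A's for-loop over `stream` with carry p0 and accumulators (res, s1, sa).
def loopA : List String → Option String → List String → List String → List String → List String × List String × List String
  | [], _, res, s1, sa => (res, s1, sa)
  | p1 :: rest, p0, res, s1, sa =>
    match p0 with
    | none => loopA rest (some p1) res s1 sa
    | some p =>
      if p == p1 then loopA rest none res (s1 ++ [p]) (sa ++ ["0"])
      else loopA rest none (res ++ [p]) s1 (sa ++ ["1"])

-- termination bound for amls_round: s1 and sa collect at most one element per completed pair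
theorem loopA_len (xs : List String) : ∀ (p0 : Option String) (res s1 sa : List String),
    (loopA xs p0 res s1 sa).2.1.length ≤ s1.length + (xs.length + (if p0.isSome then 1 else 0)) / 2 ∧
    (loopA xs p0 res s1 sa).2.2.length ≤ sa.length + (xs.length + (if p0.isSome then 1 else 0)) / 2 := by
  induction xs with
  | nil => intro p0 res s1 sa; simp [loopA]
  | cons p1 rest ih =>
    intro p0 res s1 sa
    cases p0 with
    | none =>
      simp only [loopA]
      have h := ih (some p1) res s1 sa
      simp at h ⊢
      omega
    | some p =>
      simp only [loopA]
      by_cases hpq : p == p1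
      · simp only [hpq, if_true]
        have h := ih none res (s1 ++ [p]) (sa ++ ["0"])
        simp at h ⊢
        omega
      · simp only [hpq]
        have h := ih none (res ++ [p]) s1 (sa ++ ["1"])
        simp at h ⊢
        omega

def amls_round (stream : List String) : List String :=
  if stream.length < 2 then []
  else
    let t := loopA stream none [] [] []
    t.1 ++ amls_round t.2.2 ++ amls_round t.2.1
termination_by stream.length
decreasing_by
  · have h := (loopA_len stream none [] [] []).2
    simp at h
    omega
  · have h := (loopA_len stream none [] [] []).1
    simp at h
    omega

-- ===== PORT B =====
-- B's inner index loop: take elements two at a time, emitting into (res, s1, sa) in order.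
def pairUp : List String → List String × List String × List String
  | a :: b :: rest =>
    let t := pairUp rest
    if a == b then (t.1, a :: t.2.1, "0" :: t.2.2)
    else (a :: t.1, t.2.1, "1" :: t.2.2)
  | _ => ([], [], [])

theorem pairUp_len (xs : List String) :
    (pairUp xs).2.1.length ≤ xs.length / 2 ∧ (pairUp xs).2.2.length ≤ xs.length / 2 := by
  induction xs using pairUp.induct with
  | case1 a b rest h ih => simp [pairUp, h]; omega
  | case2 a b rest h ih => simp [pairUp, h]; omega
  | case3 t h =>
    cases t with
    | nil => simp [pairUp]
    | cons x u =>
      cases u with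
      | nil => simp [pairUp]
      | cons y v => exact absurd rfl (h x y v)

-- B's while-loop over the work stack, accumulating `out`.
def goB : List (List String) → List String → List String
  | [], out => out
  | s :: stk, out =>
    if s.length < 2 then goB stk out
    else
      let t := pairUp s
      goB (t.2.2 :: t.2.1 :: stk) (out ++ t.1)
termination_by stack _ => (stack.map (fun s => 3 ^ s.length)).sum
decreasing_by
  · simp only [List.map_cons, List.sum_cons]
    have : 0 < 3 ^ s.length := pow_pos (show 0 < 3 by norm_num) _
    omega
  · simp only [List.map_cons, List.sum_cons]
    have h1 := (pairUp_len s).1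
    have h2 := (pairUp_len s).2
    have hb : s.length / 2 ≤ s.length - 1 := by omega
    have e1 : 3 ^ (pairUp s).2.1.length ≤ 3 ^ (s.length - 1) :=
      Nat.pow_le_pow_right (by norm_num) (le_trans h1 hb)
    have e2 : 3 ^ (pairUp s).2.2.length ≤ 3 ^ (s.length - 1) :=
      Nat.pow_le_pow_right (by norm_num) (le_trans h2 hb)
    have e0 : 0 < 3 ^ (s.length - 1) := pow_pos (show 0 < 3 by norm_num) _
    have e3 : 3 ^ (s.length - 1) * 3 = 3 ^ s.length := by
      rw [← pow_succ]; congr 1; omega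
    omega

def amls_round_alt (stream : List String) : List String := goB [stream] []

-- ===== PRECONDITION & SPEC =====
def Spec_amls_round (stream : List String) (out : List String) : Prop := out = amls_round_alt stream
instance (stream : List String) (out : List String) : Decidable (Spec_amls_round stream out) := by unfold Spec_amls_round; infer_instance

-- ===== CLAIM (what is proved, stated in full; the proofs are below) =====
def Claim_equal_amls_round : Prop := ∀ (stream : List String), Dom_amls_round stream → Spec_amls_round stream (amls_round stream)

-- ===== LEMMAS AND PROOFS =====

-- A's carry loop computes exactly B's pairwise split, appended to the accumulators.
theorem loopA_eq_pairUp (xs : List String) : ∀ (res s1 sa : List String),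
    loopA xs none res s1 sa =
      (res ++ (pairUp xs).1, s1 ++ (pairUp xs).2.1, sa ++ (pairUp xs).2.2) := by
  induction xs using pairUp.induct with
  | case1 a b rest h ih =>
    intro res s1 sa
    simp [loopA, pairUp, h, ih]
  | case2 a b rest h ih =>
    intro res s1 sa
    simp [loopA, pairUp, h, ih]
  | case3 t h =>
    intro res s1 sa
    cases t with
    | nil => simp [loopA, pairUp]
    | cons x u =>
      cases u with
      | nil => simp [loopA, pairUp]
      | cons y v => exact absurd rfl (h x y v)

-- one recursive layer of A in terms of pairUp
theorem amls_round_unfold (s : List String) (h : ¬ s.length < 2) :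
    amls_round s = (pairUp s).1 ++ amls_round (pairUp s).2.2 ++ amls_round (pairUp s).2.1 := by
  rw [amls_round]
  simp [h, loopA_eq_pairUp]

-- the stack loop flushes the pending streams in pre-order, i.e. A's order
theorem goB_eq (stk : List (List String)) (out : List String) :
    goB stk out = out ++ (stk.map amls_round).flatten := by
  induction stk, out using goB.induct with
  | case1 out => simp [goB]
  | case2 s stk out h ih =>
    rw [goB]
    simp only [h, if_true, ih]
    have hnil : amls_round s = [] := by rw [amls_round]; simp [h]
    simp [hnil]
  | case3 s stk out h t ih =>
    rw [show t = pairUp s from rfl] at ih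
    rw [goB]
    simp only [h, if_false]
    rw [ih]
    simp [amls_round_unfold s h, List.append_assoc]

-- ===== VERDICT (by name: the statement is the Claim_ definition above) =====
theorem amls_round_spec : Claim_equal_amls_round := by
  intro stream _
  unfold Spec_amls_round amls_round_alt
  rw [goB_eq]
  simp
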